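-- pv_equiv track=rewrite | github.com/hummodi6991/Oaktree-AI-Estimator | app/ingest/ms_buildings.py | _geometry_column
-- ===== SOURCE A (Python) =====
-- GEOMETRY_COLUMNS = ["geometry", "geom", "wkt", "polygon", "multipolygon", "GeoJSON", "geojson"]
--
-- def _geometry_column(fieldnames: list[str] | None) -> str | None:
--     if not fieldnames:
--         return None
--     lowered = {name.lower(): name for name in fieldnames}
--     for candidate in GEOMETRY_COLUMNS:
--         if candidate.lower() in lowered:
--             return lowered[candidate.lower()]
--     return None
-- ===== SOURCE B (Python) =====
-- GEOMETRY_COLUMNS = ["geometry", "geom", "wkt", "polygon", "multipolygon", "GeoJSON", "geojson"]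
--
-- def _geometry_column(fieldnames):
--     # Single pass over fieldnames: rank each name by the priority index of its
--     # lowercase form among the candidates, keep the best-ranked name; on equal
--     # rank the later name wins (as dict construction keeps the last value).
--     if fieldnames is None:
--         return None
--     prio = [c.lower() for c in GEOMETRY_COLUMNS]
--     best = None
--     for name in fieldnames:
--         low = name.lower()
--         if low in prio:
--             i = prio.index(low)
--             if best is None or i <= best[0]:
--                 best = (i, name)
--     return best[1] if best else None
-- ===== Notes on version B (the rewrite author's own statement) =====
-- stated objective: alternative
-- what changed: Inverts the traversal: instead of building a lowered-name dict and scanning the candidate list for the first present key, B makes a single pass over the fieldnames, ranking each name by the priority index of its lowercase form and keeping the best rank with last-wins tie-breaking.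
import Mathlib
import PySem

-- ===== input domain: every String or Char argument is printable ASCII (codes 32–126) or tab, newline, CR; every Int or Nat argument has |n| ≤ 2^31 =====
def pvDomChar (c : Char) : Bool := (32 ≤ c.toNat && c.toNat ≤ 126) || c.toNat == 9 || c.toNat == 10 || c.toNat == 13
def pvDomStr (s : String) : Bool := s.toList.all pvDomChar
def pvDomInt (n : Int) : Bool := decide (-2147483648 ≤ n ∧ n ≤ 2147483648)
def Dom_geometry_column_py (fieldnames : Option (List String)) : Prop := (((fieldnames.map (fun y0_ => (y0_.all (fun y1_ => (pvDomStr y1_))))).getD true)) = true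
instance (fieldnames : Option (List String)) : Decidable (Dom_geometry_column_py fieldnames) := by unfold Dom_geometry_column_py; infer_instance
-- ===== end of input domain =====

-- B inverts A's traversal: one pass over the fieldnames ranking each name by the
-- priority index of its lowercase form, keeping the best rank (last wins on ties),
-- instead of A's lowered-name dict scanned candidate by candidate.

def pvGeomColumns : List String :=
  ["geometry", "geom", "wkt", "polygon", "multipolygon", "GeoJSON", "geojson"]

-- ===== PORT A =====
-- the 'for candidate in GEOMETRY_COLUMNS' loop of A
def pvLoopA : List String → PySem.Dict String String → Option String
  | [], _ => none
  | c :: rest, d =>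
      if d.contains (PySem.Str.lower c) then d.get? (PySem.Str.lower c)
      else pvLoopA rest d

def geometry_column_py (fieldnames : Option (List String)) : Option String :=
  match fieldnames with
  | none => none
  | some l =>
      if l = [] then none
      else
        let lowered := l.foldl (fun d name => d.insert (PySem.Str.lower name) name) PySem.Dict.empty
        pvLoopA pvGeomColumns lowered

-- ===== PORT B =====
-- the loop body of B: rank the name, keep it when it ties or beats the best so far
def pvStepB (prio : List String) (acc : Option (Nat × String)) (name : String) : Option (Nat × String) :=
  match PySem.List.index? prio (PySem.Str.lower name) with
  | none => acc
  | some i =>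
      match acc with
      | none => some (i, name)
      | some (j, _) => if i ≤ j then some (i, name) else acc

def geometry_column_py_alt (fieldnames : Option (List String)) : Option String :=
  match fieldnames with
  | none => none
  | some l =>
      let prio := pvGeomColumns.map PySem.Str.lower
      let best := l.foldl (pvStepB prio) none
      best.map Prod.snd

-- ===== PRECONDITION & SPEC =====
def Spec_geometry_column_py (fieldnames : Option (List String)) (out : Option String) : Prop := out = geometry_column_py_alt fieldnames
instance (fieldnames : Option (List String)) (out : Option String) : Decidable (Spec_geometry_column_py fieldnames out) := by unfold Spec_geometry_column_py; infer_instance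

-- ===== CLAIM (what is proved, stated in full; the proofs are below) =====
def Claim_equal_geometry_column_py : Prop := ∀ (fieldnames : Option (List String)), Dom_geometry_column_py fieldnames → Spec_geometry_column_py fieldnames (geometry_column_py fieldnames)

-- ===== LEMMAS AND PROOFS =====

-- reverse linear search: the value A's dict holds at a key (last insertion wins)
def pvFindName (cl : String) : List String → Option String
  | [] => none
  | n :: rest => if PySem.Str.lower n = cl then some n else pvFindName cl rest

-- intermediate form of A: candidate-major scan over the raw list
def pvLoopM : List String → List String → Option String
  | [], _ => none
  | c :: rest, l =>
      match pvFindName (PySem.Str.lower c) l.reverse with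
      | some n => some n
      | none => pvLoopM rest l

theorem pvFindName_append (cl : String) (xs ys : List String) :
    pvFindName cl (xs ++ ys) = ((pvFindName cl xs).orElse (fun _ => pvFindName cl ys)) := by
  induction xs with
  | nil => simp [pvFindName]
  | cons n rest ih =>
      simp only [List.cons_append, pvFindName]
      split_ifs with h
      · rfl
      · exact ih

-- the dict built by A answers exactly like a reverse scan of the list
theorem pvDict_get (l : List String) (d : PySem.Dict String String) (k : String) :
    (l.foldl (fun d name => d.insert (PySem.Str.lower name) name) d).get? k
      = ((pvFindName k l.reverse).orElse (fun _ => d.get? k)) := by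
  induction l generalizing d with
  | nil => simp [pvFindName]
  | cons n rest ih =>
      simp only [List.foldl_cons, List.reverse_cons]
      rw [ih, pvFindName_append]
      cases hf : pvFindName k rest.reverse with
      | some v => simp [Option.orElse]
      | none =>
          rw [PySem.Dict.get?_insert]
          by_cases h : PySem.Str.lower n = k
          · simp [Option.orElse, pvFindName, h]
          · have h' : ¬ k = PySem.Str.lower n := fun hk => h hk.symm
            simp [Option.orElse, pvFindName, h, h']

theorem pvLoopA_eq_M (cands : List String) (l : List String) :
    pvLoopA cands (l.foldl (fun d name => d.insert (PySem.Str.lower name) name) PySem.Dict.empty)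
      = pvLoopM cands l := by
  induction cands with
  | nil => rfl
  | cons c rest ih =>
      simp only [pvLoopA, pvLoopM]
      rw [PySem.Dict.contains_eq_isSome_get?, pvDict_get]
      cases hf : pvFindName (PySem.Str.lower c) l.reverse with
      | some v =>
          simp [Option.orElse]
      | none =>
          simpa [Option.orElse, hf, PySem.Dict.get?_empty] using ih

-- how B's step reacts to the head candidate: a matching name always takes over
theorem pvStepB_head (k : String) (prest : List String) (a : Option (Nat × String))
    (m : String) (hm : PySem.Str.lower m = k) :
    pvStepB (k :: prest) a m = some (0, m) := by
  unfold pvStepB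
  rw [hm, PySem.List.index?_cons_self]
  cases a with
  | none => rfl
  | some p => simp

-- a rank-0 accumulator is never displaced by a name missing the head candidate
theorem pvStepB_keep_zero (k : String) (prest : List String) (n : String)
    (m : String) (hm : PySem.Str.lower m ≠ k) :
    pvStepB (k :: prest) (some (0, n)) m = some (0, n) := by
  unfold pvStepB
  rw [PySem.List.index?_cons_of_ne prest (fun h => hm h.symm)]
  cases hi : PySem.List.index? prest (PySem.Str.lower m) with
  | none => simp
  | some i => simp

-- B's step on a shifted accumulator, for a name not matching the head candidate
theorem pvStepB_shift (k : String) (prest : List String) (a : Option (Nat × String))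
    (m : String) (hm : PySem.Str.lower m ≠ k) :
    pvStepB (k :: prest) (a.map (fun p => (p.1 + 1, p.2))) m
      = (pvStepB prest a m).map (fun p => (p.1 + 1, p.2)) := by
  unfold pvStepB
  rw [PySem.List.index?_cons_of_ne prest (fun h => hm h.symm)]
  cases hi : PySem.List.index? prest (PySem.Str.lower m) with
  | none => simp
  | some i =>
      cases a with
      | none => simp
      | some p =>
          by_cases hij : i ≤ p.1 <;> simp [hij]

-- core characterisation: the fold with head candidate c, by right induction on l
theorem pvFold_cons (c : String) (rest : List String) (l : List String) :
    l.foldl (pvStepB (PySem.Str.lower c :: rest.map PySem.Str.lower)) none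
      = (match pvFindName (PySem.Str.lower c) l.reverse with
         | some n => some (0, n)
         | none => (l.foldl (pvStepB (rest.map PySem.Str.lower)) none).map
                     (fun p => (p.1 + 1, p.2))) := by
  induction l using List.reverseRecOn with
  | nil => simp [pvFindName]
  | append_singleton l m ih =>
      rw [List.foldl_append, List.foldl_append, ih]
      simp only [List.foldl_cons, List.foldl_nil, List.reverse_append, List.reverse_cons,
        List.reverse_nil, List.nil_append, List.cons_append, pvFindName]
      by_cases hm : PySem.Str.lower m = PySem.Str.lower c
      · rw [if_pos hm]
        cases pvFindName (PySem.Str.lower c) l.reverse with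
        | some n => exact pvStepB_head _ _ _ _ hm
        | none => exact pvStepB_head _ _ _ _ hm
      · rw [if_neg hm]
        cases hf : pvFindName (PySem.Str.lower c) l.reverse with
        | some n => exact pvStepB_keep_zero _ _ _ _ hm
        | none => exact pvStepB_shift _ _ _ _ hm

-- candidate-major scan equals name-major fold (projected to the name)
theorem pvM_eq_fold (cands : List String) (l : List String) :
    pvLoopM cands l = (l.foldl (pvStepB (cands.map PySem.Str.lower)) none).map Prod.snd := by
  induction cands generalizing l with
  | nil =>
      have : l.foldl (pvStepB ([] : List String)) none = none := by
        induction l with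
        | nil => rfl
        | cons n rest ih => simpa [pvStepB, PySem.List.index?] using ih
      simp [pvLoopM, this]
  | cons c rest ih =>
      simp only [pvLoopM, List.map_cons]
      rw [pvFold_cons]
      cases hf : pvFindName (PySem.Str.lower c) l.reverse with
      | some n => simp
      | none => simp [ih, Option.map_map, Function.comp_def]

-- ===== VERDICT (by name: the statement is the Claim_ definition above) =====
theorem geometry_column_py_spec : Claim_equal_geometry_column_py := by
  intro fieldnames _
  unfold Spec_geometry_column_py geometry_column_py geometry_column_py_alt
  cases fieldnames with
  | none => rfl
  | some l =>
      by_cases h : l = []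
      · subst h; rfl
      · simp only [if_neg h]
        rw [pvLoopA_eq_M, pvM_eq_fold]
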